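-- pv_equiv track=rewrite | github.com/lollinng/Competitive | CodeForces/Codeforces Round 938 (Div. 3)/B. Progressive Square/main.py | calculate
-- ===== SOURCE A (Python) =====
-- def calculate(n,c,d,list_):
--     a = min(list_)
--     for i in range(n):
--         if i==0:
--             temp = a
--         else:
--             temp = a+(i*c)
--
--         if temp in list_:
--             list_.remove(temp)
--         else:
--             return "NO"
--
--         for _ in range(1,n):
--             temp+=d
--             if temp in list_:
--                 list_.remove(temp)
--             else:
--                 return "NO"
--
--     return "YES"
-- ===== SOURCE B (Python) =====
-- def calculate(n, c, d, list_):
--     # Sort-and-merge: sort the input and the expected grid values, then check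
--     # sub-multiset containment with one two-pointer sweep. Does not mutate list_
--     # (A mutates it; the equivalence is about the return value).
--     a = min(list_)
--     if n > 0 and n * n > len(list_):
--         return "NO"  # n*n needed values cannot fit in a shorter list
--     need = sorted(a + i * c + j * d for i in range(n) for j in range(n))
--     have = sorted(list_)
--     i = j = 0
--     while i < len(need) and j < len(have):
--         if need[i] == have[j]:
--             i += 1
--             j += 1
--         elif need[i] > have[j]:
--             j += 1
--         else:
--             break
--     return "YES" if i == len(need) else "NO"
-- ===== Notes on version B (the rewrite author's own statement) =====
-- stated objective: alternative
-- what changed: A repeatedly scans and mutates list_ (membership test + list.remove per expected value, early exit inside nested loops); B instead answers NO outright when n*n exceeds len(list_), and otherwise sorts the input and the expected grid values once and decides sub-multiset containment by a single two-pointer merge sweep, with no mutation and no removal loop.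
import Mathlib
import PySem

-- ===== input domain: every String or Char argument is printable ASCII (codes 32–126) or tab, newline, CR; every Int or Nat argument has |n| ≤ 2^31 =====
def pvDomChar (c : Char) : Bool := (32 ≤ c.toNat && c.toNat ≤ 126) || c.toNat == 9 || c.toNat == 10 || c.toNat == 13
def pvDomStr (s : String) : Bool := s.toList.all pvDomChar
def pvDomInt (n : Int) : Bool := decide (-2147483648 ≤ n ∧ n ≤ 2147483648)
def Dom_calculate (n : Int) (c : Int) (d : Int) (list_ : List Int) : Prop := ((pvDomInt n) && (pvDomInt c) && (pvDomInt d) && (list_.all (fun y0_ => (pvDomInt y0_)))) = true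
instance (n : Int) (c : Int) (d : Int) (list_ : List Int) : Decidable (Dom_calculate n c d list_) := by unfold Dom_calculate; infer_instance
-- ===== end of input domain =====

-- B replaces A's interleaved membership-scan-and-remove nested loops by sort-then-merge:
-- sort the input and the expected grid values once and decide sub-multiset containment by a
-- single two-pointer sweep; B does not mutate list_ — the equivalence is about the return value only.


-- ===== PORT A =====
-- inner 'for _ in range(1,n)' loop: temp += d; if temp in list_: list_.remove(temp) else return "NO"
def calcInnerA (d : Int) : Nat → Int → List Int → Option (Int × List Int)
  | 0, temp, lst => some (temp, lst)
  | k + 1, temp, lst =>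
    let temp' := temp + d
    match PySem.List.remove? lst temp' with
    | some lst' => calcInnerA d k temp' lst'
    | none => none

-- outer 'for i in range(n)' loop, carrying the remaining list
def calcOuterA (a c d n : Int) : Nat → Int → List Int → String
  | 0, _, _ => "YES"
  | k + 1, i, lst =>
    let temp := if i = 0 then a else a + i * c
    match PySem.List.remove? lst temp with
    | none => "NO"
    | some lst' =>
      match calcInnerA d (n - 1).toNat temp lst' with
      | none => "NO"
      | some (_, lst'') => calcOuterA a c d n k (i + 1) lst''

def calculate (n : Int) (c : Int) (d : Int) (list_ : List Int) : String :=
  match PySem.List.min? list_ (fun x => x) with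
  | none => ""  -- unreachable under Pre_calculate: min([]) raises ValueError
  | some a => calcOuterA a c d n n.toNat 0 list_

-- ===== PORT B =====
-- the generator: a + i*c + j*d for i in range(n) for j in range(n)
def gridVals (a c d n : Int) : List Int :=
  (PySem.List.pyRange 0 n 1).flatMap (fun i => (PySem.List.pyRange 0 n 1).map (fun j => a + i * c + j * d))

-- the two-pointer while loop, as recursion on the two (sorted) suffixes
def twoPtr : List Int → List Int → Bool
  | [], _ => true
  | _ :: _, [] => false
  | x :: xs, y :: ys =>
    if x = y then twoPtr xs ys
    else if x > y then twoPtr (x :: xs) ys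
    else false
  termination_by xs ys => xs.length + ys.length
  decreasing_by all_goals (simp; try omega)

def calculate_alt (n : Int) (c : Int) (d : Int) (list_ : List Int) : String :=
  match PySem.List.min? list_ (fun x => x) with
  | none => ""  -- unreachable under Pre_calculate: min([]) raises ValueError
  | some a =>
    if n > 0 ∧ n * n > PySem.List.len list_ then "NO"  -- n*n needed values cannot fit in a shorter list
    else
      let need := PySem.List.sorted (gridVals a c d n) (fun x => x) false
      let hav := PySem.List.sorted list_ (fun x => x) false
      if twoPtr need hav then "YES" else "NO"

-- ===== PRECONDITION & SPEC =====
-- A (and B) raise ValueError on min of an empty list; nothing else raises.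
def Pre_calculate (n : Int) (c : Int) (d : Int) (list_ : List Int) : Prop := list_ ≠ []
instance (n : Int) (c : Int) (d : Int) (list_ : List Int) : Decidable (Pre_calculate n c d list_) := by unfold Pre_calculate; infer_instance
def pvWitness_calculate : Int × Int × Int × List Int := (2, 2, 1, [1, 2, 3, 4])

def Spec_calculate (n : Int) (c : Int) (d : Int) (list_ : List Int) (out : String) : Prop := out = calculate_alt n c d list_
instance (n : Int) (c : Int) (d : Int) (list_ : List Int) (out : String) : Decidable (Spec_calculate n c d list_ out) := by unfold Spec_calculate; infer_instance

-- ===== CLAIM (what is proved, stated in full; the proofs are below) =====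
def Claim_equal_calculate : Prop := ∀ (n : Int) (c : Int) (d : Int) (list_ : List Int), Dom_calculate n c d list_ → Pre_calculate n c d list_ → Spec_calculate n c d list_ (calculate n c d list_)

-- ===== LEMMAS AND PROOFS =====

-- proof-only abstraction of A's removals: consume each value in turn, none = some removal failed
def consume? : List Int → List Int → Option (List Int)
  | [], lst => some lst
  | v :: vs, lst =>
    match PySem.List.remove? lst v with
    | some lst' => consume? vs lst'
    | none => none

-- the expected values in exactly A's traversal order, k rows starting at row i
def expBlock (a c d n : Int) : Nat → Int → List Int
  | 0, _ => []
  | k + 1, i =>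
    ((if i = 0 then a else a + i * c) ::
      (List.range (n - 1).toNat).map (fun j : Nat => (if i = 0 then a else a + i * c) + ((j : Int) + 1) * d))
      ++ expBlock a c d n k (i + 1)

theorem consume?_append (xs ys lst : List Int) :
    consume? (xs ++ ys) lst = (consume? xs lst).bind (consume? ys) := by
  induction xs generalizing lst with
  | nil => simp [consume?]
  | cons v vs ih =>
    simp only [List.cons_append, consume?]
    cases PySem.List.remove? lst v with
    | none => rfl
    | some lst' => exact ih lst'

theorem consume?_isSome_iff (vs : List Int) : ∀ lst : List Int,
    (consume? vs lst).isSome = true ↔ ∀ v, vs.count v ≤ lst.count v := by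
  induction vs with
  | nil => intro lst; simp [consume?]
  | cons v vs ih =>
    intro lst
    by_cases hv : v ∈ lst
    · rw [consume?, PySem.List.remove?_eq_some_erase lst v hv]
      rw [ih (lst.erase v)]
      constructor
      · intro h w
        have := h w
        rw [List.count_erase] at this
        by_cases hw : w = v
        · subst hw
          have h1 : 1 ≤ lst.count w := List.one_le_count_iff.mpr hv
          simp at this ⊢
          omega
        · simp [List.count_cons, hw] at this ⊢
          simpa [beq_iff_eq, Ne.symm hw] using this
      · intro h w
        have := h w
        rw [List.count_erase]
        by_cases hw : w = v
        · subst hw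
          simp [List.count_cons] at this ⊢
          omega
        · simp [List.count_cons, hw] at this
          simpa [beq_iff_eq, Ne.symm hw] using this
    · rw [consume?, (PySem.List.remove?_eq_none_iff lst v).mpr hv]
      have hz : lst.count v = 0 := List.count_eq_zero.mpr hv
      simp only [Option.isSome_none, Bool.false_eq_true, false_iff, not_forall, not_le]
      refine ⟨v, ?_⟩
      simp [List.count_cons_self, hz]

theorem innerA_eq_consume (d : Int) : ∀ (k : Nat) (temp : Int) (lst : List Int),
    (calcInnerA d k temp lst).map Prod.snd
      = consume? ((List.range k).map (fun j : Nat => temp + ((j : Int) + 1) * d)) lst := by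
  intro k
  induction k with
  | zero => intro temp lst; simp [calcInnerA, consume?]
  | succ k ih =>
    intro temp lst
    have h0 : temp + (((0 : Nat) : Int) + 1) * d = temp + d := by push_cast; ring
    have harg : ((fun j : Nat => temp + ((j : Int) + 1) * d) ∘ Nat.succ)
        = fun j : Nat => (temp + d) + ((j : Int) + 1) * d := by
      funext j
      simp only [Function.comp]
      push_cast
      ring
    rw [List.range_succ_eq_map, List.map_cons, List.map_map, h0, harg]
    simp only [consume?, calcInnerA]
    cases hrm : PySem.List.remove? lst (temp + d) with
    | none => simp
    | some lst' => simpa using ih (temp + d) lst'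

theorem outerA_eq_consume (a c d n : Int) : ∀ (k : Nat) (i : Int) (lst : List Int),
    calcOuterA a c d n k i lst
      = if (consume? (expBlock a c d n k i) lst).isSome then "YES" else "NO" := by
  intro k
  induction k with
  | zero => intro i lst; simp [calcOuterA, expBlock, consume?]
  | succ k ih =>
    intro i lst
    cases hrm : PySem.List.remove? lst (if i = 0 then a else a + i * c) with
    | none => simp [calcOuterA, expBlock, consume?, hrm]
    | some lst' =>
      have hin := innerA_eq_consume d (n - 1).toNat (if i = 0 then a else a + i * c) lst'
      simp only [calcOuterA, expBlock, List.cons_append, consume?, hrm]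
      rw [consume?_append]
      cases hA : calcInnerA d (n - 1).toNat (if i = 0 then a else a + i * c) lst' with
      | none =>
        rw [hA] at hin
        simp only [Option.map_none] at hin
        rw [← hin]
        simp
      | some r =>
        rw [hA] at hin
        simp only [Option.map_some] at hin
        rw [← hin]
        simp only [Option.bind_some]
        exact ih (i + 1) r.2

-- one row of expBlock is row i of the grid (needs 1 ≤ n so the row is nonempty)
theorem expRow_eq (a c d : Int) (n : Int) (hn : 1 ≤ n) (i : Int) :
    ((if i = 0 then a else a + i * c) ::
      (List.range (n - 1).toNat).map (fun j : Nat => (if i = 0 then a else a + i * c) + ((j : Int) + 1) * d))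
      = (List.range n.toNat).map (fun j : Nat => a + i * c + (j : Int) * d) := by
  have hbase : (if i = 0 then a else a + i * c) = a + i * c := by
    by_cases hi : i = 0 <;> simp [hi]
  apply List.ext_getElem
  · simp; omega
  · intro p h1 h2
    cases p with
    | zero =>
      simp only [List.getElem_cons_zero, List.getElem_map, List.getElem_range, hbase]
      push_cast
      ring
    | succ q =>
      simp only [List.getElem_cons_succ, List.getElem_map, List.getElem_range, hbase]
      push_cast
      ring

theorem expBlock_flat (a c d n : Int) (hn : 1 ≤ n) : ∀ (k : Nat) (i : Int),
    expBlock a c d n k i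
      = (List.range k).flatMap (fun t : Nat => (List.range n.toNat).map (fun j : Nat => a + (i + (t : Int)) * c + (j : Int) * d)) := by
  intro k
  induction k with
  | zero => intro i; simp [expBlock]
  | succ k ih =>
    intro i
    rw [expBlock, expRow_eq a c d n hn i, ih (i + 1), List.range_succ_eq_map,
        List.flatMap_cons, List.flatMap_map]
    congr 1
    · apply List.map_congr_left
      intro j _
      push_cast
      ring
    · apply List.flatMap_congr
      intro t _
      apply List.map_congr_left
      intro j _
      push_cast
      ring

theorem expBlock_eq_gridVals (a c d n : Int) :
    expBlock a c d n n.toNat 0 = gridVals a c d n := by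
  by_cases hn : 1 ≤ n
  · rw [expBlock_flat a c d n hn n.toNat 0, gridVals, PySem.List.pyRange_zero n,
        List.flatMap_map]
    apply List.flatMap_congr
    intro t _
    simp only [Function.comp, List.map_map]
    apply List.map_congr_left
    intro j _
    simp only [Function.comp]
    push_cast
    ring
  · have h0 : n.toNat = 0 := by omega
    rw [h0, gridVals, PySem.List.pyRange_one_eq_nil (by omega)]
    simp [expBlock]

-- counts compare across a ::-step on both sides
theorem count_cons_le_cons (x : Int) (xs ys : List Int) :
    (∀ v, (x :: xs).count v ≤ (x :: ys).count v) ↔ ∀ v, xs.count v ≤ ys.count v := by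
  constructor
  · intro h v
    have hx := h v
    by_cases hv : v = x
    · subst hv
      rw [List.count_cons_self, List.count_cons_self] at hx
      omega
    · rwa [List.count_cons_of_ne (Ne.symm hv), List.count_cons_of_ne (Ne.symm hv)] at hx
  · intro h v
    by_cases hv : v = x
    · subst hv
      rw [List.count_cons_self, List.count_cons_self]
      exact Nat.succ_le_succ (h v)
    · rw [List.count_cons_of_ne (Ne.symm hv), List.count_cons_of_ne (Ne.symm hv)]
      exact h v

-- two-pointer sweep on sorted lists decides the count condition
theorem twoPtr_iff : ∀ (ys xs : List Int), xs.Pairwise (· ≤ ·) → ys.Pairwise (· ≤ ·) →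
    (twoPtr xs ys = true ↔ ∀ v, xs.count v ≤ ys.count v) := by
  intro ys
  induction ys with
  | nil =>
    intro xs hx _
    cases xs with
    | nil => simp [twoPtr]
    | cons x xs' =>
      simp only [twoPtr, Bool.false_eq_true, false_iff, not_forall, not_le]
      refine ⟨x, ?_⟩
      simp [List.count_cons_self]
  | cons y ys' ih =>
    intro xs hx hy
    cases xs with
    | nil => simp [twoPtr]
    | cons x xs' =>
      rw [twoPtr]
      by_cases hxy : x = y
      · subst hxy
        rw [if_pos rfl, ih xs' (List.Pairwise.of_cons hx) (List.Pairwise.of_cons hy)]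
        exact (count_cons_le_cons x xs' ys').symm
      · rw [if_neg hxy]
        by_cases hgt : x > y
        · rw [if_pos hgt, ih (x :: xs') hx (List.Pairwise.of_cons hy)]
          constructor
          · intro h v
            calc (x :: xs').count v ≤ ys'.count v := h v
              _ ≤ (y :: ys').count v := by
                  by_cases hv : v = y
                  · subst hv; rw [List.count_cons_self]; omega
                  · rw [List.count_cons_of_ne (Ne.symm hv)]
          · intro h v
            by_cases hv : v = y
            · subst hv
              have hnm : v ∉ x :: xs' := by
                intro hm
                rcases List.mem_cons.mp hm with h1 | h1
                · omega
                · have := (List.pairwise_cons.mp hx).1 v h1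
                  omega
              simp [List.count_eq_zero.mpr hnm]
            · have hyv := h v
              rwa [List.count_cons_of_ne (Ne.symm hv)] at hyv
        · rw [if_neg hgt]
          simp only [Bool.false_eq_true, false_iff, not_forall, not_le]
          refine ⟨x, ?_⟩
          have hnm : x ∉ y :: ys' := by
            intro hm
            rcases List.mem_cons.mp hm with h1 | h1
            · omega
            · have := (List.pairwise_cons.mp hy).1 x h1
              omega
          rw [List.count_eq_zero.mpr hnm, List.count_cons_self]
          omega

theorem length_gridVals (a c d n : Int) :
    (gridVals a c d n).length = n.toNat * n.toNat := by
  rw [gridVals, PySem.List.pyRange_zero n, List.flatMap_map, List.length_flatMap]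
  simp [PySem.List.pyRange_zero n, Function.comp, List.sum_replicate, mul_comm]

-- ===== VERDICT (by name: the statement is the Claim_ definition above) =====
theorem calculate_spec : Claim_equal_calculate := by
  intro n c d list_ _ hpre
  unfold Spec_calculate calculate calculate_alt
  cases hmin : PySem.List.min? list_ (fun x => x) with
  | none => rfl
  | some a =>
    show calcOuterA a c d n n.toNat 0 list_
        = (if n > 0 ∧ n * n > PySem.List.len list_ then "NO"
           else if twoPtr (PySem.List.sorted (gridVals a c d n) (fun x => x) false)
              (PySem.List.sorted list_ (fun x => x) false) then "YES" else "NO")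
    by_cases hg : n > 0 ∧ n * n > PySem.List.len list_
    · rw [if_pos hg, outerA_eq_consume a c d n n.toNat 0 list_, if_neg]
      intro hs
      have hcnt := (consume?_isSome_iff (expBlock a c d n n.toNat 0) list_).mp hs
      rw [expBlock_eq_gridVals] at hcnt
      have hsub : List.Subperm (gridVals a c d n) list_ :=
        List.subperm_ext_iff.mpr (fun x _ => hcnt x)
      have hlen := hsub.length_le
      rw [length_gridVals] at hlen
      have hlen2 : (list_.length : Int) < n * n := by
        simpa [PySem.List.len_eq] using hg.2
      have key : ((n.toNat : Int)) = n := Int.toNat_of_nonneg hg.1.le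
      have hcast : ((n.toNat : Int) * (n.toNat : Int)) ≤ (list_.length : Int) := by
        exact_mod_cast hlen
      rw [key] at hcast
      linarith
    · rw [if_neg hg]
      have hc1 := (PySem.List.sorted_perm (gridVals a c d n) (fun x => x) false)
      have hc2 := (PySem.List.sorted_perm list_ (fun x => x) false)
      have hiff : ((consume? (expBlock a c d n n.toNat 0) list_).isSome = true)
          ↔ (twoPtr (PySem.List.sorted (gridVals a c d n) (fun x => x) false)
              (PySem.List.sorted list_ (fun x => x) false) = true) := by
        rw [consume?_isSome_iff, expBlock_eq_gridVals,
            twoPtr_iff (PySem.List.sorted list_ (fun x => x) false)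
              (PySem.List.sorted (gridVals a c d n) (fun x => x) false)
              (by simpa using PySem.List.sorted_pairwise (gridVals a c d n) (fun x => x))
              (by simpa using PySem.List.sorted_pairwise list_ (fun x => x))]
        constructor
        · intro h v
          rw [hc1.count_eq, hc2.count_eq]
          exact h v
        · intro h v
          have := h v
          rwa [hc1.count_eq, hc2.count_eq] at this
      rw [outerA_eq_consume a c d n n.toNat 0 list_]
      exact if_congr hiff rfl rfl
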